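-- pv_equiv track=rewrite | github.com/himanshu-byte/QRli | pypi/QRlib/util.py | _geturldata
-- ===== SOURCE A (Python) =====
-- def _geturldata(url):
--     surl = str(url)
--     temp1 = 0
--     temp2 = 0
--     for temp3 in surl:
-- 	    temp2 = temp2+1
-- 	    if(temp3=='/'):
-- 		    temp1 = temp1+1
-- 	    if(temp1==3):
-- 		    break
--     surldata = url[int(temp2):int(len(url))]
--     return surldata
-- ===== SOURCE B (Python) =====
-- def _geturldata(url):
--     surl = str(url)
--     slashes = [i for i, c in enumerate(surl) if c == '/']
--     if len(slashes) < 3: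
--         return ''
--     return surl[slashes[2] + 1:]
-- ===== Notes on version B (the rewrite author's own statement) =====
-- stated objective: alternative
-- what changed: A counts characters with a manual break-on-third-slash loop and slices from the counter; B builds the list of all slash indices with one enumerate-comprehension and slices just past the third index (or returns '' if fewer than three).
import Mathlib
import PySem

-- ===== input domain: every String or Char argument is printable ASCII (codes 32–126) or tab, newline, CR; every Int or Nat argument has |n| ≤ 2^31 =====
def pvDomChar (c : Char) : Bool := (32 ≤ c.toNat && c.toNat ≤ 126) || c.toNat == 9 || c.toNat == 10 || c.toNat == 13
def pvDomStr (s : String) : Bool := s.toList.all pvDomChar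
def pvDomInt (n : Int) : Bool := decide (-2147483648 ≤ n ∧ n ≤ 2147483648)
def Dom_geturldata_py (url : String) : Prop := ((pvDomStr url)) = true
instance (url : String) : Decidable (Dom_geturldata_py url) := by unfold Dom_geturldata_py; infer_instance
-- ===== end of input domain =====

-- B replaces A's manual break-on-third-slash counting loop by collecting all slash
-- indices and slicing past the third one (objective: alternative decomposition).

-- ===== PORT A =====
def geturldataLoopA : List Char → Int → Int → Int × Int
  | [], temp1, temp2 => (temp1, temp2)
  | temp3 :: rest, temp1, temp2 =>
    let temp2' := temp2 + 1
    let temp1' := if temp3 = '/' then temp1 + 1 else temp1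
    if temp1' = 3 then (temp1', temp2') else geturldataLoopA rest temp1' temp2'

def geturldata_py (url : String) : String :=
  let surl := url
  let st := geturldataLoopA surl.toList 0 0
  String.ofList (PySem.List.slice url.toList (some st.2) (some (url.toList.length : Int)))

-- ===== PORT B =====
def geturldata_py_alt (url : String) : String :=
  let surl := url
  let slashes := ((PySem.List.enumerate surl.toList 0).filter (fun p => decide (p.2 = '/'))).map (·.1)
  if slashes.length < 3 then ""
  else String.ofList (PySem.List.slice surl.toList (some (PySem.List.pyGetD slashes 2 0 + 1)) none)

-- ===== PRECONDITION & SPEC =====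
def Spec_geturldata_py (url : String) (out : String) : Prop := out = geturldata_py_alt url
instance (url : String) (out : String) : Decidable (Spec_geturldata_py url out) := by unfold Spec_geturldata_py; infer_instance

-- ===== CLAIM (what is proved, stated in full; the proofs are below) =====
def Claim_equal_geturldata_py : Prop := ∀ (url : String), Dom_geturldata_py url → Spec_geturldata_py url (geturldata_py url)

-- ===== LEMMAS AND PROOFS =====

/-- Common reference: the remainder of `l` after its `k`-th slash ([] if fewer). -/
def pvAfter : List Char → Nat → List Char
  | [], _ => []
  | c :: rest, k => if c = '/' then (if k ≤ 1 then rest else pvAfter rest (k - 1)) else pvAfter rest k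

/-- Number of characters A's loop consumes when `k` more slashes are needed. -/
def pvStop : List Char → Nat → Nat
  | [], _ => 0
  | c :: rest, k => if c = '/' ∧ k ≤ 1 then 1 else pvStop rest (if c = '/' then k - 1 else k) + 1

theorem loopA_snd (l : List Char) : ∀ (n : Nat) (t2 : Int), n < 3 →
    (geturldataLoopA l (n : Int) t2).2 = t2 + (pvStop l (3 - n) : Int) := by
  induction l with
  | nil => intro n t2 _; simp [geturldataLoopA, pvStop]
  | cons c rest ih =>
    intro n t2 hn
    by_cases hc : c = '/'
    · subst hc
      by_cases h2 : n = 2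
      · subst h2
        simp [geturldataLoopA, pvStop]
      · have h3 : ¬ ((n : Int) + 1 = 3) := by omega
        have hrec := ih (n + 1) (t2 + 1) (by omega)
        push_cast at hrec
        have hk : ¬ (('/' : Char) = '/' ∧ 3 - n ≤ 1) := by simp; omega
        simp only [geturldataLoopA, if_true]
        rw [if_neg h3, hrec]
        conv_rhs => rw [pvStop]
        rw [if_neg hk, if_pos rfl]
        rw [show 3 - n - 1 = 2 - n from by omega]
        push_cast
        ring
    · have h3 : ¬ ((n : Int) = 3) := by omega
      have hrec := ih n (t2 + 1) hn
      have hk : ¬ ((c = '/') ∧ 3 - n ≤ 1) := by simp [hc]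
      simp only [geturldataLoopA, if_neg hc, if_neg h3]
      rw [hrec]
      conv_rhs => rw [pvStop]
      rw [if_neg hk, if_neg hc]
      push_cast
      ring

theorem pvStop_le (l : List Char) : ∀ k, pvStop l k ≤ l.length := by
  induction l with
  | nil => intro k; simp [pvStop]
  | cons c rest ih =>
    intro k
    rw [pvStop]
    split_ifs
    · simp
    · have := ih (k - 1); simp; omega
    · have := ih k; simp; omega

theorem drop_pvStop (l : List Char) : ∀ k, l.drop (pvStop l k) = pvAfter l k := by
  induction l with
  | nil => intro k; simp [pvStop, pvAfter]
  | cons c rest ih =>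
    intro k
    by_cases hc : c = '/'
    · by_cases hk : k ≤ 1
      · simp [pvStop, pvAfter, hc, hk]
      · simp [pvStop, pvAfter, hc, hk, ih]
    · simp [pvStop, pvAfter, hc, ih]

/-- A equals `String.ofList (pvAfter l 3)`. -/
theorem portA_eq (url : String) : geturldata_py url = String.ofList (pvAfter url.toList 3) := by
  show String.ofList (PySem.List.slice url.toList (some (geturldataLoopA url.toList 0 0).2)
        (some (url.toList.length : Int))) = String.ofList (pvAfter url.toList 3)
  have h := loopA_snd url.toList 0 0 (by omega)
  simp only [Nat.cast_zero] at h
  rw [h, zero_add, PySem.List.slice_natCast]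
  rw [← drop_pvStop url.toList 3]
  congr 1
  apply List.take_of_length_le
  have := pvStop_le url.toList 3
  simp

/-- slash-index list with a general start offset. -/
def pvS (l : List Char) (s : Int) : List Int :=
  ((PySem.List.enumerate l s).filter (fun p => decide (p.2 = '/'))).map (·.1)

theorem pvS_cons (c : Char) (rest : List Char) (s : Int) :
    pvS (c :: rest) s = (if c = '/' then [s] else []) ++ pvS rest (s + 1) := by
  by_cases hc : c = '/'
  · simp [pvS, PySem.List.enumerate_cons, hc]
  · simp [pvS, PySem.List.enumerate_cons, hc]

theorem pvS_main (l : List Char) : ∀ (k : Nat) (s : Int),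
    (k < (pvS l s).length → ∃ m : Nat, (pvS l s)[k]? = some (s + m) ∧ m < l.length ∧
       l.drop (m + 1) = pvAfter l (k + 1))
    ∧ ((pvS l s).length ≤ k → pvAfter l (k + 1) = []) := by
  induction l with
  | nil =>
    intro k s
    constructor
    · intro h
      simp [pvS, PySem.List.enumerate_nil] at h
    · intro _
      simp [pvAfter]
  | cons c rest ih =>
    intro k s
    by_cases hc : c = '/'
    · subst hc
      have hS : pvS ('/' :: rest) s = s :: pvS rest (s + 1) := by
        rw [pvS_cons]; simp
      constructor
      · intro h
        rw [hS] at h ⊢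
        match k with
        | 0 =>
          refine ⟨0, by simp, by simp, ?_⟩
          simp [pvAfter]
        | Nat.succ k =>
          obtain ⟨m, h1, h2, h3⟩ := (ih k (s + 1)).1 (by simp at h; omega)
          refine ⟨m + 1, ?_, by simp; omega, ?_⟩
          · rw [List.getElem?_cons_succ, h1, Option.some_inj]
            push_cast
            ring
          · rw [List.drop_succ_cons, h3]
            conv_rhs => rw [pvAfter]
            rw [if_pos rfl, if_neg (by omega), show k + 1 + 1 - 1 = k + 1 from by omega]
      · intro h
        rw [hS] at h
        match k with
        | 0 => exact absurd h (by simp)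
        | Nat.succ k =>
          have htail := (ih k (s + 1)).2 (by simp at h; omega)
          conv_lhs => rw [pvAfter]
          rw [if_pos rfl, if_neg (by omega), show k + 1 + 1 - 1 = k + 1 from by omega]
          exact htail
    · have hS : pvS (c :: rest) s = pvS rest (s + 1) := by
        rw [pvS_cons, if_neg hc]; simp
      constructor
      · intro h
        rw [hS] at h ⊢
        obtain ⟨m, h1, h2, h3⟩ := (ih k (s + 1)).1 h
        refine ⟨m + 1, ?_, by simp; omega, ?_⟩
        · rw [h1, Option.some_inj]
          push_cast
          ring
        · rw [List.drop_succ_cons, h3]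
          conv_rhs => rw [pvAfter]
          rw [if_neg hc]
      · intro h
        rw [hS] at h
        have htail := (ih k (s + 1)).2 h
        conv_lhs => rw [pvAfter]
        rw [if_neg hc]
        exact htail

-- ===== VERDICT (by name: the statement is the Claim_ definition above) =====
theorem geturldata_py_spec : Claim_equal_geturldata_py := by
  intro url _
  unfold Spec_geturldata_py
  rw [portA_eq]
  show String.ofList (pvAfter url.toList 3) =
    (if (pvS url.toList 0).length < 3 then ""
     else String.ofList (PySem.List.slice url.toList (some (PySem.List.pyGetD (pvS url.toList 0) 2 0 + 1)) none))
  by_cases h : (pvS url.toList 0).length < 3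
  · rw [if_pos h]
    have := (pvS_main url.toList 2 0).2 (by omega)
    rw [this]
  · rw [if_neg h]
    obtain ⟨m, h1, h2, h3⟩ := (pvS_main url.toList 2 0).1 (by omega)
    have hget : PySem.List.pyGetD (pvS url.toList 0) 2 0 = (m : Int) := by
      rw [show (2 : Int) = ((2 : Nat) : Int) from by norm_num, PySem.List.pyGetD_natCast]
      rw [List.getD_eq_getElem?_getD, h1]
      simp
    rw [hget]
    rw [show (m : Int) + 1 = (((m + 1 : Nat)) : Int) from by push_cast; ring]
    rw [PySem.List.slice_from_natCast, h3]
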